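-- pv_equiv track=rewrite | github.com/ChrisMaxheart/Competitive-Programming | Google Codejam/2021/qualification/a.py | solution
-- ===== SOURCE A (Python) =====
-- def solution(N, lst):
--     cpylst = lst[:]
--     ttl = 0
--     for i in range(len(cpylst) - 1):
--         elem = min(cpylst[i:len(cpylst)])
--         idx = cpylst.index(elem, i)
--         to_reverse = cpylst[i:idx+1]
--         ttl += len(to_reverse)
--         cpylst = cpylst[:i] + to_reverse[::-1] + cpylst[idx+1:]
--     return ttl
-- ===== SOURCE B (Python) =====
-- def solution(N, lst):
--     # Same total-Reversort-cost computation, but shrinking a working suffix: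
--     # one argmin scan per round, reverse the prefix of the suffix and drop its head.
--     total = 0
--     seg = lst
--     while len(seg) > 1:
--         j = 0
--         for k in range(1, len(seg)):
--             if seg[k] < seg[j]:
--                 j = k
--         total += j + 1
--         seg = seg[:j + 1][::-1][1:] + seg[j + 1:]
--     return total
-- ===== Notes on version B (the rewrite author's own statement) =====
-- stated objective: simpler
-- what changed: B drops A's fixed-prefix rebuild of the whole list (min + list.index + three-slice concatenation each round) and instead keeps only the unsorted suffix, finding the argmin with a single scan and recursing on the reversed-prefix tail.
import Mathlib
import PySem

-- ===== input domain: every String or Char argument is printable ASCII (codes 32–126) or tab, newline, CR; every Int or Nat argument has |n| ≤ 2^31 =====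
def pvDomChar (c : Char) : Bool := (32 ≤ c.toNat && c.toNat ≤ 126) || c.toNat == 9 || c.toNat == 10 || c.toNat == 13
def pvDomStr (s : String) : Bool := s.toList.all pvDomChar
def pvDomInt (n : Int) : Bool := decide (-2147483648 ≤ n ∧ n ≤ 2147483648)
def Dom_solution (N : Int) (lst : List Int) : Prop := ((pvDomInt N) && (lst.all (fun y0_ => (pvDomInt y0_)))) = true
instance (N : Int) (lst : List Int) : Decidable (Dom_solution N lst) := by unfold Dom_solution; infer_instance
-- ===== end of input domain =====

-- B recomputes the same Reversort cost on a shrinking suffix (one argmin scan per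
-- round) instead of A's fixed-prefix full-list rebuild with min+index; objective: simpler.

-- ===== PORT A =====
-- A's loop body ('for i in range(len(cpylst)-1)'), state = (cpylst, ttl).
-- min(cpylst[i:len(cpylst)]) always sees a nonempty slice here, so .getD 0 is unreachable;
-- cpylst.index(elem, i) is search from position i, ported as index in the slice from i plus i.
def solStep (st : List Int × Int) (i : Int) : List Int × Int :=
  let cpylst := st.1
  let elem := (PySem.List.min? (PySem.List.slice cpylst (some i) (some (cpylst.length : Int))) (fun x => x)).getD 0
  let idx : Int := (((PySem.List.index? (PySem.List.slice cpylst (some i) none) elem).getD 0 : Nat) : Int) + i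
  let to_reverse := PySem.List.slice cpylst (some i) (some (idx + 1))
  (PySem.List.slice cpylst none (some i)
     ++ ((PySem.List.slice? to_reverse none none (-1)).getD [])
     ++ PySem.List.slice cpylst (some (idx + 1)) none,
   st.2 + (to_reverse.length : Int))

def solution (N : Int) (lst : List Int) : Int :=
  let cpylst := PySem.List.slice lst none none   -- lst[:]
  ((PySem.List.pyRange 0 ((cpylst.length : Int) - 1) 1).foldl solStep (cpylst, 0)).2

-- ===== PORT B =====
-- inner scan 'for k in range(1, len(seg)): if seg[k] < seg[j]: j = k',
-- carried as (remaining, current min value, its index j, next index k)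
def bScan : List Int → Int → Nat → Nat → Nat
  | [], _, j, _ => j
  | v :: rest, m, j, k => if v < m then bScan rest v k (k + 1) else bScan rest m j (k + 1)

-- the 'while len(seg) > 1' loop, as structural recursion on the shrinking suffix
-- fuel = the suffix length (the loop removes one element per round); structural recursion
def goCost : Nat → List Int → Int
  | 0, _ => 0
  | _ + 1, [] => 0
  | _ + 1, [_] => 0
  | fuel + 1, x :: y :: t =>
    let seg := x :: y :: t
    let j := bScan (y :: t) x 0 1
    ((j : Int) + 1) + goCost fuel (((seg.take (j + 1)).reverse).tail ++ seg.drop (j + 1))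

def solution_alt (N : Int) (lst : List Int) : Int := goCost lst.length lst

-- ===== PRECONDITION & SPEC =====
def Spec_solution (N : Int) (lst : List Int) (out : Int) : Prop := out = solution_alt N lst
instance (N : Int) (lst : List Int) (out : Int) : Decidable (Spec_solution N lst out) := by unfold Spec_solution; infer_instance

-- ===== CLAIM (what is proved, stated in full; the proofs are below) =====
def Claim_equal_solution : Prop := ∀ (N : Int) (lst : List Int), Dom_solution N lst → Spec_solution N lst (solution N lst)

-- ===== LEMMAS AND PROOFS =====

theorem bScan_spec (xs : List Int) : ∀ (pre : List Int) (m : Int) (j : Nat),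
    j < pre.length → pre.getD j 0 = m →
    (∀ p ∈ pre, m ≤ p) → (∀ q, q < j → m < pre.getD q 0) →
    bScan xs m j pre.length < (pre ++ xs).length ∧
    (∀ p ∈ pre ++ xs, (pre ++ xs).getD (bScan xs m j pre.length) 0 ≤ p) ∧
    (∀ q, q < bScan xs m j pre.length →
      (pre ++ xs).getD (bScan xs m j pre.length) 0 < (pre ++ xs).getD q 0) := by
  induction xs with
  | nil =>
    intro pre m j hj hgd hle hstrict
    simp only [bScan, List.append_nil]
    exact ⟨hj, fun p hp => hgd ▸ hle p hp, fun q hq => hgd ▸ hstrict q hq⟩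
  | cons v rest ih =>
    intro pre m j hj hgd hle hstrict
    have hassoc : pre ++ v :: rest = (pre ++ [v]) ++ rest := by simp
    simp only [bScan]
    by_cases hv : v < m
    · rw [if_pos hv, hassoc]
      have hlen : (pre ++ [v]).length = pre.length + 1 := by simp
      have := ih (pre ++ [v]) v pre.length
        (by simp)
        (by rw [List.getD_append_right pre [v] 0 pre.length (le_refl _)]; simp)
        (by intro p hp
            rcases List.mem_append.1 hp with h | h
            · exact le_of_lt (lt_of_lt_of_le hv (hle p h))
            · simp at h; omega)
        (by intro q hq
            rw [List.getD_append _ _ _ _ hq]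
            have : pre.getD q 0 ∈ pre := by
              rw [List.getD_eq_getElem _ _ hq]; exact List.getElem_mem hq
            exact lt_of_lt_of_le hv (hle _ this))
      rwa [hlen] at this
    · rw [if_neg hv, hassoc]
      have hlen : (pre ++ [v]).length = pre.length + 1 := by simp
      have := ih (pre ++ [v]) m j
        (by simp; omega)
        (by rw [List.getD_append _ _ _ _ hj]; exact hgd)
        (by intro p hp
            rcases List.mem_append.1 hp with h | h
            · exact hle p h
            · simp at h; omega)
        (by intro q hq
            rw [List.getD_append _ _ _ _ (lt_trans hq hj)]
            exact hstrict q hq)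
      rwa [hlen] at this

theorem firstMin (x : Int) (ys : List Int) :
    bScan ys x 0 1 < (x :: ys).length ∧
    (∀ p ∈ x :: ys, (x :: ys).getD (bScan ys x 0 1) 0 ≤ p) ∧
    (∀ q, q < bScan ys x 0 1 → (x :: ys).getD (bScan ys x 0 1) 0 < (x :: ys).getD q 0) := by
  have := bScan_spec ys [x] x 0 (by simp) (by simp) (by simp) (by omega)
  simpa using this

theorem min?_eq_of_firstMin (seg : List Int) (r : Nat) (hr : r < seg.length)
    (hmin : ∀ p ∈ seg, seg.getD r 0 ≤ p) :
    PySem.List.min? seg (fun x => x) = some (seg.getD r 0) := by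
  have hne : seg ≠ [] := by intro h; simp [h] at hr
  cases hm : PySem.List.min? seg (fun x => x) with
  | none => exact absurd ((PySem.List.min?_eq_none_iff seg (fun x => x)).1 hm) hne
  | some m0 =>
    have h1 : m0 ∈ seg := PySem.List.min?_mem hm
    have h2 := PySem.List.min?_isMin hm (seg.getD r 0)
      (by rw [List.getD_eq_getElem _ _ hr]; exact List.getElem_mem hr)
    have h3 := hmin m0 h1
    have : m0 = seg.getD r 0 := le_antisymm h2 h3
    rw [this]

theorem index?_eq_of_firstMin (seg : List Int) (r : Nat) (hr : r < seg.length)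
    (hstrict : ∀ q, q < r → seg.getD r 0 < seg.getD q 0) :
    PySem.List.index? seg (seg.getD r 0) = some r := by
  rw [PySem.List.index?_eq_some_iff]
  refine ⟨seg.take r, seg.drop (r + 1), ?_, ?_, ?_⟩
  · rw [List.getD_eq_getElem _ _ hr]
    conv_lhs => rw [← List.take_append_drop r seg]
    rw [← List.getElem_cons_drop hr]
  · simp [Nat.le_of_lt hr]
  · intro hmem
    obtain ⟨q, hq, hqe⟩ := List.getElem_of_mem hmem
    have hq' : q < r := by simpa using (List.length_take_le r seg) |>.trans_lt' hq
    rw [List.getElem_take] at hqe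
    have := hstrict q hq'
    rw [List.getD_eq_getElem _ _ (hq'.trans hr)] at this
    omega

theorem loop_eq (L : Nat) : ∀ (fuel i : Nat) (c : List Int) (acc : Int),
    c.length = L → L - 1 - i = fuel →
    ((PySem.List.pyRange (i : Int) ((L : Int) - 1) 1).foldl solStep (c, acc)).2
      = acc + goCost (L - i) (c.drop i) := by
  intro fuel
  induction fuel with
  | zero =>
    intro i c acc hL hf
    rw [PySem.List.pyRange_one_eq_nil (by omega)]
    simp only [List.foldl_nil]
    have hlen : (c.drop i).length ≤ 1 := by simp [hL]; omega
    have h0 : ∀ f : Nat, goCost f [] = 0 := fun f => by cases f <;> simp [goCost]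
    have h1 : ∀ (f : Nat) (a : Int), goCost f [a] = 0 := fun f a => by cases f <;> simp [goCost]
    cases hd : c.drop i with
    | nil => simp [h0]
    | cons a tl =>
      cases tl with
      | nil => simp [h1]
      | cons b tl2 => rw [hd] at hlen; simp at hlen
  | succ f ih =>
    intro i c acc hL hf
    have h2 : i + 2 ≤ L := by omega
    rw [PySem.List.pyRange_one_cons (by omega : (i : Int) < (L : Int) - 1), List.foldl_cons]
    obtain ⟨x, y, t, hxyt⟩ : ∃ x y t, c.drop i = x :: y :: t := by
      have hlen : 2 ≤ (c.drop i).length := by simp [hL]; omega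
      cases hd : c.drop i with
      | nil => rw [hd] at hlen; simp at hlen
      | cons a tl =>
        cases tl with
        | nil => rw [hd] at hlen; simp at hlen
        | cons b tl2 => exact ⟨a, b, tl2, rfl⟩
    set r : Nat := bScan (y :: t) x 0 1 with hrdef
    have hfm := firstMin x (y :: t)
    rw [← hxyt, ← hrdef] at hfm
    obtain ⟨hrlt, hminp, hstrict⟩ := hfm
    have hrL : r < L - i := by rw [List.length_drop, hL] at hrlt; exact hrlt
    set m : Int := (c.drop i).getD r 0 with hmdef
    -- the pieces of solStep
    have e1 : PySem.List.slice c (some (i : Int)) (some ((c.length : Int))) = c.drop i := by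
      rw [PySem.List.slice_natCast]
      exact List.take_of_length_le (by simp)
    have e2 : PySem.List.slice c (some (i : Int)) none = c.drop i :=
      PySem.List.slice_from_natCast c i
    have e3 : PySem.List.min? (c.drop i) (fun x => x) = some m :=
      min?_eq_of_firstMin _ r hrlt hminp
    have e4 : PySem.List.index? (c.drop i) m = some r :=
      index?_eq_of_firstMin _ r hrlt hstrict
    have ecast1 : ((r : Int) + (i : Int)) + 1 = (i : Int) + ((r + 1 : Nat) : Int) := by
      push_cast; ring
    have e5 : PySem.List.slice c (some (i : Int)) (some (((r : Int) + (i : Int)) + 1))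
        = (c.drop i).take (r + 1) := by
      rw [ecast1]; exact PySem.List.slice_natCast_add c i (r + 1)
    have e6 : PySem.List.slice c none (some (i : Int)) = c.take i :=
      PySem.List.slice_to_natCast c i
    have ecast2 : ((r : Int) + (i : Int)) + 1 = ((i + (r + 1) : Nat) : Int) := by
      push_cast; ring
    have e7 : PySem.List.slice c (some (((r : Int) + (i : Int)) + 1)) none
        = (c.drop i).drop (r + 1) := by
      rw [ecast2, PySem.List.slice_from_natCast, List.drop_drop]
    have e8 : PySem.List.slice? ((c.drop i).take (r + 1)) none none (-1)
        = some ((c.drop i).take (r + 1)).reverse :=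
      PySem.List.slice?_none_none_neg_one _
    have e9 : ((((c.drop i).take (r + 1)).length : Nat) : Int) = (r : Int) + 1 := by
      rw [List.length_take]
      have : min (r + 1) (c.drop i).length = r + 1 := by
        rw [List.length_drop, hL]; omega
      rw [this]; push_cast; ring
    have hstep : solStep (c, acc) (i : Int) =
        (c.take i ++ ((c.drop i).take (r + 1)).reverse ++ (c.drop i).drop (r + 1),
         acc + ((r : Int) + 1)) := by
      simp only [solStep, e1, e3, Option.getD_some, e2, e4, e5, e6, e7, e8, e9]
    rw [hstep]
    -- apply the induction hypothesis at i+1 on the rebuilt list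
    set c' : List Int :=
      c.take i ++ ((c.drop i).take (r + 1)).reverse ++ (c.drop i).drop (r + 1) with hc'
    have hlen' : c'.length = L := by
      simp only [hc', List.length_append, List.length_reverse, List.length_take,
        List.length_drop, hL]
      omega
    have hcast : ((i : Int) + 1) = ((i + 1 : Nat) : Int) := by push_cast; ring
    rw [hcast]
    rw [ih (i + 1) c' (acc + ((r : Int) + 1)) hlen' (by omega)]
    have l1 : (c.take i).length = i := by rw [List.length_take]; omega
    have l2 : (((c.drop i).take (r + 1)).reverse).length = r + 1 := by
      rw [List.length_reverse, List.length_take, List.length_drop, hL]; omega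
    have hdrop' : c'.drop (i + 1) =
        (((c.drop i).take (r + 1)).reverse).tail ++ (c.drop i).drop (r + 1) := by
      rw [hc', List.append_assoc, show i + 1 = (c.take i).length + 1 by rw [l1]]
      rw [List.drop_append]
      have hnil : List.drop ((c.take i).length + 1) (c.take i) = [] := by
        apply List.drop_eq_nil_of_le; omega
      rw [hnil, show (c.take i).length + 1 - (c.take i).length = 1 by omega, List.drop_one]
      have hBne : (List.take (r + 1) (List.drop i c)).reverse ≠ [] := by
        intro h; rw [h] at l2; simp at l2
      simp [List.tail_append_of_ne_nil hBne]
    rw [hdrop', hxyt, show L - i = (L - (i + 1)) + 1 by omega]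
    simp only [goCost, ← hrdef]
    ring

-- ===== VERDICT (by name: the statement is the Claim_ definition above) =====
theorem solution_spec : Claim_equal_solution := by
  intro N lst _
  unfold Spec_solution solution solution_alt
  simp only [PySem.List.slice_none_none]
  have := loop_eq lst.length (lst.length - 1) 0 lst 0 rfl rfl
  simpa using this
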